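-- pv_equiv track=rewrite | github.com/roiei/ca | syntax_parser/syntax_parser_cpp_com.py | get_line_pos
-- ===== SOURCE A (Python) =====
-- def get_line_pos(code):
--     n = len(code)
--     i = 0
--     line = 1
--     pos_line = [(0, 0)]
--
--     while i < n:
--         if code[i] == '\n':
--             pos_line += (i, line),
--             line += 1
--         i += 1
--
--     pos_line += (i, line),
--     return pos_line
-- ===== SOURCE B (Python) =====
-- def get_line_pos(code):
--     parts = code.split('\n')
--     pos_line = [(0, 0)]
--     offset = 0
--     for line, part in enumerate(parts[:-1], start=1):
--         offset += len(part)
--         pos_line.append((offset, line))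
--         offset += 1
--     pos_line.append((len(code), len(parts)))
--     return pos_line
-- ===== Notes on version B (the rewrite author's own statement) =====
-- stated objective: faster
-- what changed: Replaces the per-character index scan with a single split on the newline separator followed by a cumulative-offset pass over the resulting segments.
import Mathlib
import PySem

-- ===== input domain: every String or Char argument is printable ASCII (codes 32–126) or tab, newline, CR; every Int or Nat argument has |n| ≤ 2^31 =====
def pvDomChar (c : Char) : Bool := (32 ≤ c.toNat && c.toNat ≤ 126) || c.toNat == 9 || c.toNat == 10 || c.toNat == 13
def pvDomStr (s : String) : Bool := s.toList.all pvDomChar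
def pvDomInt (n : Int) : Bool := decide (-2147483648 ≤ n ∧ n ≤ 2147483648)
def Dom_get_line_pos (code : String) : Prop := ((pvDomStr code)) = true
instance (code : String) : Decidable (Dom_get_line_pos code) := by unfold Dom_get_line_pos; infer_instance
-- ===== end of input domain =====

-- B replaces A's per-character index scan by a split on the newline separator plus a cumulative-offset pass over the segments (measured faster in a timing run: the scan moves into the C-level split).

-- ===== PORT A =====
-- A's while loop over character indices: recursion over the remaining characters,
-- carrying the index i, the line counter and the accumulated pos_line list.
def get_line_pos_loop : List Char → Int → Int → List (Int × Int) → List (Int × Int)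
  | [], i, line, acc => acc ++ [(i, line)]
  | c :: cs, i, line, acc =>
      if c = '\n' then get_line_pos_loop cs (i + 1) (line + 1) (acc ++ [(i, line)])
      else get_line_pos_loop cs (i + 1) line acc

def get_line_pos (code : String) : List (Int × Int) :=
  get_line_pos_loop code.toList 0 1 [(0, 0)]

-- ===== PORT B =====
-- B's for-loop over enumerate(parts[:-1], 1), carrying the running offset and pos_line.
def get_line_pos_alt_loop : List (Int × List Char) → Int → List (Int × Int) → List (Int × Int)
  | [], _, acc => acc
  | (line, part) :: rest, offset, acc =>
      get_line_pos_alt_loop rest (offset + (part.length : Int) + 1)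
        (acc ++ [(offset + (part.length : Int), line)])

def get_line_pos_alt (code : String) : List (Int × Int) :=
  let parts := PySem.Chars.splitOn code.toList ['\n']
  let body := get_line_pos_alt_loop
      (PySem.List.enumerate (PySem.List.slice parts none (some (-1))) 1) 0 [(0, 0)]
  body ++ [(PySem.Str.len code, (parts.length : Int))]

-- ===== PRECONDITION & SPEC =====
def Spec_get_line_pos (code : String) (out : List (Int × Int)) : Prop := out = get_line_pos_alt code
instance (code : String) (out : List (Int × Int)) : Decidable (Spec_get_line_pos code out) := by unfold Spec_get_line_pos; infer_instance

-- ===== CLAIM (what is proved, stated in full; the proofs are below) =====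
def Claim_equal_get_line_pos : Prop := ∀ (code : String), Dom_get_line_pos code → Spec_get_line_pos code (get_line_pos code)

-- ===== LEMMAS AND PROOFS =====

-- canonical form: newline tuples of cs starting at index i, line counter `line`, plus the final tuple
def pvF : List Char → Int → Int → List (Int × Int)
  | [], i, line => [(i, line)]
  | c :: cs, i, line =>
      if c = '\n' then (i, line) :: pvF cs (i + 1) (line + 1) else pvF cs (i + 1) line

-- structural single-separator split equal to splitOn … ['\n']
def pvSplit : List Char → List Char → List (List Char)
  | [], cur => [cur.reverse]
  | c :: cs, cur => if c = '\n' then cur.reverse :: pvSplit cs [] else pvSplit cs (c :: cur)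

lemma pvSplit_ne_nil (cs cur : List Char) : pvSplit cs cur ≠ [] := by
  induction cs generalizing cur with
  | nil => simp [pvSplit]
  | cons c cs ih => simp only [pvSplit]; split_ifs <;> simp [ih]

lemma pvSplit_length (cs cur : List Char) :
    ((pvSplit cs cur).length : Int) = cs.count '\n' + 1 := by
  induction cs generalizing cur with
  | nil => simp [pvSplit]
  | cons c cs ih =>
      simp only [pvSplit, List.count_cons]
      by_cases h : c = '\n'
      · subst h
        simp only [if_true, List.length_cons]
        push_cast [ih]
        norm_num
      · simp [h, ih]

lemma splitOn_go_eq :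
    ∀ fuel (l cur : List Char) (acc : List (List Char)), l.length ≤ fuel →
      PySem.Chars.splitOn.go ['\n'] fuel l cur acc = acc.reverse ++ pvSplit l cur := by
  intro fuel
  induction fuel with
  | zero =>
      intro l cur acc h
      have hl : l = [] := by cases l <;> simp_all
      subst hl; simp [PySem.Chars.splitOn.go, pvSplit]
  | succ f ih =>
      intro l cur acc h
      cases l with
      | nil => simp [PySem.Chars.splitOn.go, pvSplit]
      | cons c rest =>
          simp only [PySem.Chars.splitOn.go]
          by_cases hc : c = '\n'
          · subst hc
            have hp : List.isPrefixOf ['\n'] ('\n' :: rest) = true := by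
              simp [List.isPrefixOf]
            simp only [hp]
            rw [ih _ _ _ (by simpa using Nat.le_of_succ_le_succ h)]
            simp [pvSplit]
          · have hp : List.isPrefixOf ['\n'] (c :: rest) = false := by
              simp [List.isPrefixOf]; intro hcontra; exact hc hcontra.symm
            simp only [hp, Bool.false_eq_true, if_false]
            rw [ih _ _ _ (by simpa using Nat.le_of_succ_le_succ h)]
            simp [pvSplit, hc]

lemma splitOn_eq_pvSplit (cs : List Char) :
    PySem.Chars.splitOn cs ['\n'] = pvSplit cs [] := by
  unfold PySem.Chars.splitOn
  rw [splitOn_go_eq _ cs [] [] (by omega)]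
  simp

lemma slice_neg_one_dropLast {α : Type} (xs : List α) :
    PySem.List.slice xs none (some (-1)) = xs.dropLast := by
  cases xs with
  | nil => rfl
  | cons a l =>
      simp [PySem.List.slice, PySem.List.clampIdx, List.dropLast_eq_take]
      split_ifs <;> omega

-- A's loop appends to the accumulator
lemma loopA_acc (cs : List Char) (i line : Int) (acc : List (Int × Int)) :
    get_line_pos_loop cs i line acc = acc ++ get_line_pos_loop cs i line [] := by
  induction cs generalizing i line acc with
  | nil => simp [get_line_pos_loop]
  | cons c cs ih =>
      simp only [get_line_pos_loop]
      split_ifs with h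
      · rw [ih]
        conv_rhs => rw [ih]
        simp
      · exact ih ..

lemma loopA_eq_pvF (cs : List Char) (i line : Int) :
    get_line_pos_loop cs i line [] = pvF cs i line := by
  induction cs generalizing i line with
  | nil => simp [get_line_pos_loop, pvF]
  | cons c cs ih =>
      simp only [get_line_pos_loop, pvF]
      split_ifs with h
      · rw [loopA_acc]; simp [ih]
      · exact ih ..

-- B's loop appends to the accumulator
lemma loopB_acc (es : List (Int × List Char)) (off : Int) (acc : List (Int × Int)) :
    get_line_pos_alt_loop es off acc = acc ++ get_line_pos_alt_loop es off [] := by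
  induction es generalizing off acc with
  | nil => simp [get_line_pos_alt_loop]
  | cons e es ih =>
      obtain ⟨line, part⟩ := e
      simp only [get_line_pos_alt_loop]
      rw [ih]
      conv_rhs => rw [ih]
      simp

-- the main invariant: B's segment pass, closed off with the final tuple, equals pvF
lemma loopB_key (cs : List Char) :
    ∀ (cur : List Char) (i line : Int),
      get_line_pos_alt_loop (PySem.List.enumerate ((pvSplit cs cur).dropLast) line)
          (i - (cur.length : Int)) [] ++ [(i + cs.length, line + cs.count '\n')] =
        pvF cs i line := by
  induction cs with
  | nil =>
      intro cur i line
      simp [pvSplit, get_line_pos_alt_loop, pvF]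
  | cons c cs ih =>
      intro cur i line
      by_cases h : c = '\n'
      · subst h
        have hne := pvSplit_ne_nil cs ([] : List Char)
        simp only [pvSplit, if_true]
        rw [List.dropLast_cons_of_ne_nil hne, PySem.List.enumerate_cons]
        simp only [get_line_pos_alt_loop]
        rw [loopB_acc]
        have e1 : i - (cur.length : Int) + (cur.reverse.length : Int) = i := by simp
        have e3 : (i + ((('\n' :: cs).length : Nat) : Int),
                   line + ((List.count '\n' ('\n' :: cs) : Nat) : Int)) =
            ((i + 1) + (cs.length : Int), (line + 1) + (List.count '\n' cs : Int)) := by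
          simp only [List.length_cons, List.count_cons, beq_self_eq_true, if_true,
            Prod.mk.injEq]
          constructor <;> (push_cast; ring)
        rw [e1, e3]
        have hF : pvF ('\n' :: cs) i line = (i, line) :: pvF cs (i + 1) (line + 1) := by
          simp [pvF]
        have ih' := ih ([] : List Char) (i + 1) (line + 1)
        simp only [List.length_nil, Nat.cast_zero, sub_zero] at ih'
        rw [hF, ← ih']
        simp
      · simp only [pvSplit, if_neg h]
        have hF : pvF (c :: cs) i line = pvF cs (i + 1) line := by
          simp [pvF, h]
        have e : i - (cur.length : Int) = (i + 1) - (((c :: cur).length : Nat) : Int) := by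
          simp only [List.length_cons]; push_cast; ring
        have e3 : (i + (((c :: cs).length : Nat) : Int),
                   line + ((List.count '\n' (c :: cs) : Nat) : Int)) =
            ((i + 1) + (cs.length : Int), line + (List.count '\n' cs : Int)) := by
          have hb : List.count '\n' (c :: cs) = List.count '\n' cs := by
            simp [h]
          rw [hb]
          simp only [List.length_cons, Prod.mk.injEq, and_true]
          push_cast
          ring
        rw [hF, e, e3]
        exact ih (c :: cur) (i + 1) line

-- ===== VERDICT (by name: the statement is the Claim_ definition above) =====
theorem get_line_pos_spec : Claim_equal_get_line_pos := by
  intro code _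
  show get_line_pos code = get_line_pos_alt code
  unfold get_line_pos get_line_pos_alt
  show get_line_pos_loop code.toList 0 1 [(0, 0)] =
    get_line_pos_alt_loop
        (PySem.List.enumerate
          (PySem.List.slice (PySem.Chars.splitOn code.toList ['\n']) none (some (-1))) 1) 0 [(0, 0)]
      ++ [(PySem.Str.len code, ((PySem.Chars.splitOn code.toList ['\n']).length : Int))]
  rw [splitOn_eq_pvSplit, slice_neg_one_dropLast, loopA_acc, loopA_eq_pvF, loopB_acc]
  have hkey := loopB_key code.toList ([] : List Char) 0 1
  simp only [List.length_nil, Nat.cast_zero, sub_zero, zero_add] at hkey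
  rw [← hkey]
  have hfin : (PySem.Str.len code, ((pvSplit code.toList []).length : Int)) =
      ((code.toList.length : Int), (1 : Int) + (List.count '\n' code.toList : Int)) := by
    rw [pvSplit_length]
    simp only [Prod.mk.injEq]
    constructor
    · simp [PySem.Str.len_eq]
    · ring
  rw [hfin]
  simp
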